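-- pv_equiv track=rewrite | github.com/Sabri-Nang/Ejercicios-Python- | Clase04/propagar_con_for.py | propagar
-- ===== SOURCE A (Python) =====
-- def propagar(lista):
--     '''Recibe un vector con 0's, 1's y -1's y devuelve un vector en el que los
--     1's se propagaron a sus vecinos con 0'''
--     l=len(lista)-1
--
--
--     for i in range(l):
--
--         if lista[i]==1 and lista[i+1]==0:
--             lista[i+1]=1
--     for i in range(l,0,-1):
--
--         if lista[i]==1 and lista[i-1]==0:
--             lista[i-1]=1
--     return lista
-- ===== SOURCE B (Python) =====
-- def propagar(lista):
--     '''Recibe un vector con 0's, 1's y -1's y devuelve un vector en el que los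
--     1's se propagaron a sus vecinos con 0'''
--     n = len(lista)
--     i = 0
--     while i < n:
--         if lista[i] == 0:
--             j = i
--             while j < n and lista[j] == 0:
--                 j += 1
--             # maximal run of zeros is lista[i:j]; fill it iff a neighbour is exactly 1
--             if (i > 0 and lista[i - 1] == 1) or (j < n and lista[j] == 1):
--                 for k in range(i, j):
--                     lista[k] = 1
--             i = j
--         else:
--             i += 1
--     return lista
-- ===== Notes on version B (the rewrite author's own statement) =====
-- stated objective: alternative
-- what changed: Replaces A's two chained index-loop flood passes (left-to-right then right-to-left) by a single scan that locates each maximal run of consecutive zeros and fills the whole run with 1's iff the element adjacent to the run on either side is exactly 1.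
import Mathlib
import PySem

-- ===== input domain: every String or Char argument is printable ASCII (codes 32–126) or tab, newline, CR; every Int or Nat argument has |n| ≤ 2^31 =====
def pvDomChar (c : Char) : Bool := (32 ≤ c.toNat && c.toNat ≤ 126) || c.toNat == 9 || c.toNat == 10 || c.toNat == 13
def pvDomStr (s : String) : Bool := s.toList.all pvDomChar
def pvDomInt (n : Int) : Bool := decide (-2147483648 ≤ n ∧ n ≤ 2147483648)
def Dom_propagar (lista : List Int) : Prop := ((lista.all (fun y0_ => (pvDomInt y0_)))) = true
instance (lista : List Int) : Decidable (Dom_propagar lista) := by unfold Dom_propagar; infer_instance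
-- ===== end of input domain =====

-- B replaces A's two chained index-loop flood passes by a single scan that finds each
-- maximal run of zeros and fills it when an adjacent element is exactly 1 (objective:
-- alternative decomposition, same cost). Both A and B mutate the Python list in place
-- and return it; the equivalence proved here is about the returned value.

-- ===== PORT A =====
-- forward pass body: if lista[i]==1 and lista[i+1]==0: lista[i+1]=1
def propagar (lista : List Int) : List Int :=
  let l : Int := (lista.length : Int) - 1
  let a1 := (PySem.List.pyRange 0 l 1).foldl
    (fun a i =>
      if PySem.List.pyGetD a i 0 = 1 ∧ PySem.List.pyGetD a (i + 1) 0 = 0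
      then PySem.List.pySetD a (i + 1) 1 else a) lista
  (PySem.List.pyRange l 0 (-1)).foldl
    (fun a i =>
      if PySem.List.pyGetD a i 0 = 1 ∧ PySem.List.pyGetD a (i - 1) 0 = 0
      then PySem.List.pySetD a (i - 1) 1 else a) a1

-- ===== PORT B =====
-- B's outer while-loop: at a zero, take the maximal zero run (inner while j loop =
-- takeWhile/dropWhile), fill it iff the element before the run or after the run is 1;
-- `prev` carries lista[i-1] (none at the left edge).
def propagarGo (prev : Option Int) (a : List Int) : List Int :=
  match a with
  | [] => []
  | x :: xs =>
    if x = 0 then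
      let zs := xs.takeWhile (fun y => y == 0)
      let rest := xs.dropWhile (fun y => y == 0)
      List.replicate (zs.length + 1)
        (if prev == some 1 || rest.head? == some 1 then 1 else 0)
        ++ propagarGo (some 0) rest
    else x :: propagarGo (some x) xs
termination_by a.length
decreasing_by
  · have := List.length_dropWhile_le (fun y => y == 0) xs; simp; omega
  · simp

def propagar_alt (lista : List Int) : List Int := propagarGo none lista

-- ===== PRECONDITION & SPEC =====
def Spec_propagar (lista : List Int) (out : List Int) : Prop := out = propagar_alt lista
instance (lista : List Int) (out : List Int) : Decidable (Spec_propagar lista out) := by unfold Spec_propagar; infer_instance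

-- ===== CLAIM (what is proved, stated in full; the proofs are below) =====
def Claim_equal_propagar : Prop := ∀ (lista : List Int), Dom_propagar lista → Spec_propagar lista (propagar lista)

-- ===== LEMMAS AND PROOFS =====

-- Proof-only model of A's forward pass: left-to-right cascade carrying the previous
-- (already updated) value.
def fwdGo (prev : Int) (a : List Int) : List Int :=
  match a with
  | [] => []
  | x :: xs =>
    let x' := if prev = 1 ∧ x = 0 then 1 else x
    x' :: fwdGo x' xs

-- Proof-only model of A's backward pass: right-to-left cascade.
def bwdGo (a : List Int) : List Int :=
  match a with
  | [] => []
  | c :: t =>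
    let r := bwdGo t
    (if r.getD 0 0 = 1 ∧ c = 0 then 1 else c) :: r

theorem length_fwdGo (p : Int) (a : List Int) : (fwdGo p a).length = a.length := by
  induction a generalizing p with
  | nil => rfl
  | cons x xs ih => simp [fwdGo, ih]
theorem fwdGo_append_singleton (p : Int) (a : List Int) (y : Int) :
    fwdGo p (a ++ [y]) =
      fwdGo p a ++ [if (fwdGo p a).getLastD p = 1 ∧ y = 0 then 1 else y] := by
  induction a generalizing p with
  | nil => simp [fwdGo]
  | cons x xs ih =>
    simp only [List.cons_append, fwdGo, ih, List.getLastD_cons]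

theorem fwd_inv (a : List Int) (d : Nat) : ∀ (k : Nat), a.length = k + 1 + d →
    (PySem.List.pyRange (k : Int) ((a.length : Int) - 1) 1).foldl
      (fun s i =>
        if PySem.List.pyGetD s i 0 = 1 ∧ PySem.List.pyGetD s (i + 1) 0 = 0
        then PySem.List.pySetD s (i + 1) 1 else s)
      (fwdGo 0 (a.take (k+1)) ++ a.drop (k+1)) = fwdGo 0 a := by
  induction d with
  | zero =>
    intro k hk
    rw [PySem.List.pyRange_one_eq_nil (by omega)]
    rw [List.take_of_length_le (by omega), List.drop_of_length_le (by omega)]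
    simp
  | succ d ih =>
    intro k hk
    rw [PySem.List.pyRange_one_cons (by omega)]
    rw [List.foldl_cons]
    have hlt : k + 1 < a.length := by omega
    have hu : (fwdGo 0 (a.take (k+1))).length = k + 1 := by
      rw [length_fwdGo]; simp; omega
    have hget1 : PySem.List.pyGetD (fwdGo 0 (a.take (k+1)) ++ a.drop (k+1)) (k : Int) 0
        = (fwdGo 0 (a.take (k+1))).getLastD 0 := by
      rw [PySem.List.pyGetD_natCast]
      rw [List.getD_eq_getElem?_getD, List.getElem?_append_left (by omega)]
      rw [List.getLastD_eq_getLast?, List.getLast?_eq_getElem?, hu]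
      norm_num
    have hget2 : PySem.List.pyGetD (fwdGo 0 (a.take (k+1)) ++ a.drop (k+1)) ((k : Int) + 1) 0
        = a[k+1]'hlt := by
      have h1 : ((k : Int) + 1) = ((k+1 : Nat) : Int) := by push_cast; ring
      rw [h1, PySem.List.pyGetD_natCast]
      rw [List.getD_eq_getElem?_getD, List.getElem?_append_right (by omega), hu]
      simp [hlt]
    have hdrop : a.drop (k+1) = a[k+1]'hlt :: a.drop (k+2) := List.drop_eq_getElem_cons hlt
    have hset : PySem.List.pySetD (fwdGo 0 (a.take (k+1)) ++ a.drop (k+1)) ((k : Int) + 1) 1 =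
        fwdGo 0 (a.take (k+1)) ++ 1 :: a.drop (k+2) := by
      have h1 : ((k : Int) + 1) = ((k+1 : Nat) : Int) := by push_cast; ring
      rw [h1, PySem.List.pySetD_natCast]
      rw [List.set_append, hu]
      simp only [Nat.lt_irrefl, if_false, Nat.sub_self]
      rw [hdrop]
      rfl
    have htake : fwdGo 0 (a.take (k+2)) =
        fwdGo 0 (a.take (k+1)) ++
          [if (fwdGo 0 (a.take (k+1))).getLastD 0 = 1 ∧ a[k+1]'hlt = 0 then 1
           else a[k+1]'hlt] := by
      rw [show k+2 = (k+1)+1 from rfl, List.take_add_one]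
      simp only [List.getElem?_eq_getElem hlt, Option.toList_some]
      rw [fwdGo_append_singleton]
    have key : (if PySem.List.pyGetD (fwdGo 0 (a.take (k+1)) ++ a.drop (k+1)) (k : Int) 0 = 1 ∧
          PySem.List.pyGetD (fwdGo 0 (a.take (k+1)) ++ a.drop (k+1)) ((k : Int) + 1) 0 = 0
        then PySem.List.pySetD (fwdGo 0 (a.take (k+1)) ++ a.drop (k+1)) ((k : Int) + 1) 1
        else fwdGo 0 (a.take (k+1)) ++ a.drop (k+1)) = fwdGo 0 (a.take (k+2)) ++ a.drop (k+2) := by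
      rw [hget1, hget2, hset, htake]
      by_cases hc : (fwdGo 0 (a.take (k+1))).getLastD 0 = 1 ∧ a[k+1]'hlt = 0
      · rw [if_pos hc, if_pos hc]; simp
      · rw [if_neg hc, if_neg hc]; rw [hdrop]; simp
    rw [key]
    have h2 := ih (k+1) (by omega)
    have hc : ((k:Int) + 1) = ((k+1 : Nat) : Int) := by push_cast; ring
    rw [hc]
    exact h2

theorem fold_fwd_eq (a : List Int) :
    (PySem.List.pyRange 0 ((a.length : Int) - 1) 1).foldl
      (fun s i =>
        if PySem.List.pyGetD s i 0 = 1 ∧ PySem.List.pyGetD s (i + 1) 0 = 0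
        then PySem.List.pySetD s (i + 1) 1 else s) a = fwdGo 0 a := by
  cases a with
  | nil => rw [PySem.List.pyRange_one_eq_nil (by simp)]; rfl
  | cons x xs =>
    have h0 := fwd_inv (x :: xs) xs.length 0 (by simp; omega)
    simpa [fwdGo, Nat.add_comm] using h0

theorem bwd_inv (a : List Int) : ∀ (k : Nat), k + 1 ≤ a.length →
    (PySem.List.pyRange (k : Int) 0 (-1)).foldl
      (fun s i =>
        if PySem.List.pyGetD s i 0 = 1 ∧ PySem.List.pyGetD s (i - 1) 0 = 0
        then PySem.List.pySetD s (i - 1) 1 else s)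
      (a.take k ++ bwdGo (a.drop k)) = bwdGo a := by
  intro k
  induction k with
  | zero =>
    intro _
    rw [PySem.List.pyRange_neg_one_eq_nil (by omega)]
    simp
  | succ k ih =>
    intro hk
    have hlt : k < a.length := by omega
    rw [PySem.List.pyRange_neg_one_cons (by omega)]
    rw [List.foldl_cons]
    have htk : (a.take (k+1)).length = k + 1 := by simp; omega
    have htake : a.take (k+1) = a.take k ++ [a[k]'hlt] := by
      rw [List.take_add_one]
      simp only [List.getElem?_eq_getElem hlt, Option.toList_some]
    have hdrop : a.drop k = a[k]'hlt :: a.drop (k+1) := List.drop_eq_getElem_cons hlt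
    have hget1 : PySem.List.pyGetD (a.take (k+1) ++ bwdGo (a.drop (k+1))) ((k+1 : Nat) : Int) 0
        = (bwdGo (a.drop (k+1))).getD 0 0 := by
      rw [PySem.List.pyGetD_natCast]
      rw [List.getD_eq_getElem?_getD, List.getElem?_append_right (by omega), htk]
      simp [List.getD_eq_getElem?_getD]
    have hget2 : PySem.List.pyGetD (a.take (k+1) ++ bwdGo (a.drop (k+1))) (((k+1 : Nat) : Int) - 1) 0
        = a[k]'hlt := by
      have h1 : (((k+1 : Nat) : Int) - 1) = ((k : Nat) : Int) := by push_cast; ring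
      rw [h1, PySem.List.pyGetD_natCast]
      rw [List.getD_eq_getElem?_getD, List.getElem?_append_left (by omega)]
      rw [List.getElem?_take_of_lt (by omega)]
      simp [hlt]
    have hset : PySem.List.pySetD (a.take (k+1) ++ bwdGo (a.drop (k+1))) (((k+1 : Nat) : Int) - 1) 1
        = a.take k ++ 1 :: bwdGo (a.drop (k+1)) := by
      have h1 : (((k+1 : Nat) : Int) - 1) = ((k : Nat) : Int) := by push_cast; ring
      rw [h1, PySem.List.pySetD_natCast]
      rw [List.set_append]
      rw [htk, htake]
      simp only [if_pos (by omega : k < k + 1)]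
      rw [List.set_append]
      have hlen2 : (a.take k).length = k := by simp; omega
      rw [hlen2]
      simp only [lt_irrefl, if_false, Nat.sub_self]
      simp
    have key : (if PySem.List.pyGetD (a.take (k+1) ++ bwdGo (a.drop (k+1))) ((k+1 : Nat) : Int) 0 = 1 ∧
          PySem.List.pyGetD (a.take (k+1) ++ bwdGo (a.drop (k+1))) (((k+1 : Nat) : Int) - 1) 0 = 0
        then PySem.List.pySetD (a.take (k+1) ++ bwdGo (a.drop (k+1))) (((k+1 : Nat) : Int) - 1) 1
        else a.take (k+1) ++ bwdGo (a.drop (k+1)))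
        = a.take k ++ bwdGo (a.drop k) := by
      rw [hget1, hget2, hset]
      rw [hdrop]
      show _ = a.take k ++ bwdGo (a[k]'hlt :: a.drop (k+1))
      rw [bwdGo]
      by_cases hc : (bwdGo (a.drop (k+1))).getD 0 0 = 1 ∧ a[k]'hlt = 0
      · rw [if_pos hc]
        have h2 := hc.1
        rw [List.getD_eq_getElem?_getD] at h2
        simp [h2, hc.2]
      · rw [if_neg hc, if_neg hc, htake, List.append_assoc]
        rfl
    rw [key]
    have h3 : ((k+1 : Nat) : Int) - 1 = ((k : Nat) : Int) := by push_cast; ring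
    rw [h3]
    exact ih (by omega)

theorem fold_bwd_eq (a : List Int) :
    (PySem.List.pyRange ((a.length : Int) - 1) 0 (-1)).foldl
      (fun s i =>
        if PySem.List.pyGetD s i 0 = 1 ∧ PySem.List.pyGetD s (i - 1) 0 = 0
        then PySem.List.pySetD s (i - 1) 1 else s) a = bwdGo a := by
  cases a with
  | nil => rw [PySem.List.pyRange_neg_one_eq_nil (by simp)]; rfl
  | cons x xs =>
    have hlen : (x :: xs).length = xs.length + 1 := by simp
    have hlt : xs.length < (x :: xs).length := by omega
    have hc : (((x :: xs).length : Int) - 1) = ((xs.length : Nat) : Int) := by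
      rw [hlen]; push_cast; ring
    have hlast : (x :: xs).drop xs.length = [(x :: xs)[xs.length]'hlt] := by
      rw [List.drop_eq_getElem_cons hlt]
      have : (x :: xs).drop (xs.length + 1) = [] := by
        apply List.drop_of_length_le; omega
      rw [this]
    have hstart : (x :: xs).take xs.length ++ bwdGo ((x :: xs).drop xs.length) = x :: xs := by
      rw [hlast]
      have hb : bwdGo [(x :: xs)[xs.length]'hlt] = [(x :: xs)[xs.length]'hlt] := by
        simp [bwdGo]
      rw [hb]
      have ht : (x :: xs).take xs.length ++ [(x :: xs)[xs.length]'hlt] = (x :: xs).take (xs.length+1) := by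
        rw [List.take_add_one]
        simp
      rw [ht, List.take_of_length_le (by omega)]
    have h0 := bwd_inv (x :: xs) xs.length (by omega)
    rw [hstart] at h0
    rw [hc]
    exact h0

theorem fwdGo_zeros (k : Nat) : ∀ (p : Int) (rest : List Int),
    fwdGo p (List.replicate (k+1) 0 ++ rest) =
      List.replicate (k+1) (if p = 1 then 1 else 0) ++ fwdGo (if p = 1 then 1 else 0) rest := by
  induction k with
  | zero =>
    intro p rest
    by_cases hp : p = 1
    · simp [fwdGo, hp]
    · simp [fwdGo, hp]
  | succ k ih =>
    intro p rest
    rw [List.replicate_succ, List.cons_append, fwdGo]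
    by_cases hp : p = 1 <;> simp only [hp] <;> rw [ih] <;> simp [List.replicate_succ]

theorem fwdGo_head_ne_zero (p q : Int) (rest : List Int) (h : rest.head? ≠ some 0) :
    fwdGo p rest = fwdGo q rest := by
  cases rest with
  | nil => rfl
  | cons y t =>
    have hy : y ≠ 0 := by simpa using h
    simp [fwdGo, hy]

theorem bwd_repl_one (k : Nat) (v : List Int) :
    bwdGo (List.replicate k 1 ++ v) = List.replicate k 1 ++ bwdGo v := by
  induction k with
  | zero => simp
  | succ k ih => rw [List.replicate_succ, List.cons_append, bwdGo]; simp [ih]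

theorem bwd_repl_zero (k : Nat) (v : List Int) :
    bwdGo (List.replicate k 0 ++ v) =
      List.replicate k (if (bwdGo v).getD 0 0 = 1 then 1 else 0) ++ bwdGo v := by
  induction k with
  | zero => simp
  | succ k ih =>
    rw [List.replicate_succ, List.cons_append, bwdGo]
    simp only [ih]
    by_cases h : (bwdGo v).getD 0 0 = 1
    · simp only [h]
      cases k with
      | zero => rw [List.getD_eq_getElem?_getD] at h; simpa using h
      | succ k => simp [List.replicate_succ, List.getD_eq_getElem?_getD]
    · simp only [h]
      cases k with
      | zero =>
        rw [List.getD_eq_getElem?_getD] at h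
        simp [h]
      | succ k =>
        simp [List.replicate_succ, List.getD_eq_getElem?_getD]

theorem bwd_fwd_head (p : Int) (rest : List Int) (h : rest.head? ≠ some 0) :
    (bwdGo (fwdGo p rest)).getD 0 0 = rest.getD 0 0 := by
  cases rest with
  | nil => rfl
  | cons y t =>
    have hy : y ≠ 0 := by simpa using h
    simp [fwdGo, bwdGo, hy]

theorem bwd_fwd_go_aux (n : Nat) : ∀ (a : List Int), a.length ≤ n →
    ∀ (p : Int) (op : Option Int), (op = some 1 ↔ p = 1) →
    bwdGo (fwdGo p a) = propagarGo op a := by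
  induction n with
  | zero =>
    intro a ha p op _
    have : a = [] := List.length_eq_zero_iff.mp (Nat.le_zero.mp ha)
    subst this
    simp [fwdGo, bwdGo, propagarGo]
  | succ n ih =>
    intro a ha p op hop
    cases a with
    | nil => simp [fwdGo, bwdGo, propagarGo]
    | cons x xs =>
      by_cases hx : x = 0
      · subst hx
        set zs := xs.takeWhile (fun y => y == 0) with hzsdef
        set rest := xs.dropWhile (fun y => y == 0) with hrestdef
        have hsplit : zs ++ rest = xs := List.takeWhile_append_dropWhile
        have hzs : zs = List.replicate zs.length 0 := by
          apply List.eq_replicate_of_mem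
          intro b hb
          have := List.mem_takeWhile_imp hb
          simpa using this
        have hrest : rest.head? ≠ some 0 := by
          intro hcon
          cases hr : rest with
          | nil => rw [hr] at hcon; simp at hcon
          | cons y t =>
            rw [hr] at hcon
            simp at hcon
            have : (fun y => y == 0) y = false := by
              have := List.head?_dropWhile_not (fun y => y == 0) xs
              rw [← hrestdef, hr] at this
              simpa using this
            simp [hcon] at this
        have hform : (0 : Int) :: xs = List.replicate (zs.length + 1) 0 ++ rest := by
          rw [List.replicate_succ, List.cons_append]
          rw [← hsplit]
          rw [← hzs]
        have hlen : rest.length ≤ n := by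
          have h1 := List.length_dropWhile_le (fun y => y == 0) xs
          have h2 : rest.length = (List.dropWhile (fun y => y == 0) xs).length := by
            rw [hrestdef]
          simp at ha
          omega
        have hgo : propagarGo op ((0:Int) :: xs) =
            List.replicate (zs.length + 1)
              (if op == some 1 || rest.head? == some 1 then 1 else 0)
              ++ propagarGo (some 0) rest := by
          rw [propagarGo]
          simp only [← hzsdef, ← hrestdef, if_true]
        rw [hgo, hform, fwdGo_zeros]
        rw [fwdGo_head_ne_zero _ 0 rest hrest]
        have hIH : bwdGo (fwdGo 0 rest) = propagarGo (some 0) rest :=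
          ih rest hlen 0 (some 0) (by simp)
        by_cases hp : p = 1
        · have hop1 : op = some 1 := hop.mpr hp
          rw [if_pos hp, bwd_repl_one, hIH, hop1]
          simp
        · have hop1 : (op == some 1) = false := by
            have h1 : op ≠ some 1 := fun hcon => hp (hop.mp hcon)
            simpa using h1
          rw [if_neg hp, bwd_repl_zero, hIH]
          have hhead : (propagarGo (some 0) rest).getD 0 0 = rest.getD 0 0 := by
            rw [← hIH]; exact bwd_fwd_head 0 rest hrest
          have hval : (if (propagarGo (some 0) rest).getD 0 0 = 1 then (1:Int) else 0)
              = if (op == some 1 || rest.head? == some 1) = true then 1 else 0 := by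
            rw [hhead, hop1, Bool.false_or]
            cases rest with
            | nil => simp
            | cons y t =>
              by_cases hy : y = 1
              · simp [hy, List.getD_eq_getElem?_getD]
              · simp [hy, List.getD_eq_getElem?_getD]
          rw [hval]
      · have hfwd : fwdGo p (x :: xs) = x :: fwdGo x xs := by
          simp [fwdGo, hx]
        have hbwd : bwdGo (x :: fwdGo x xs) = x :: bwdGo (fwdGo x xs) := by
          rw [bwdGo]; simp [hx]
        rw [hfwd, hbwd]
        rw [ih xs (by simpa using ha) x (some x) (by simp)]
        rw [propagarGo]
        simp [hx]


-- ===== VERDICT (by name: the statement is the Claim_ definition above) =====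
theorem propagar_spec : Claim_equal_propagar := by
  intro lista _
  unfold Spec_propagar propagar propagar_alt
  have h1 := fold_fwd_eq lista
  have hlen : ((fwdGo 0 lista).length : Int) - 1 = ((lista.length : Int) - 1) := by
    rw [length_fwdGo]
  have h2 := fold_bwd_eq (fwdGo 0 lista)
  rw [hlen] at h2
  show (PySem.List.pyRange ((lista.length : Int) - 1) 0 (-1)).foldl _
      ((PySem.List.pyRange 0 ((lista.length : Int) - 1) 1).foldl _ lista) = _
  rw [h1, h2]
  exact bwd_fwd_go_aux lista.length lista (le_refl _) 0 none (by simp)
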